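-- pv_equiv track=rewrite | github.com/Dikshj/personalayer | sdk/python/personal_context_layer.py | _normalize_feature_id
-- ===== SOURCE A (Python) =====
-- def _normalize_feature_id(feature_id: str) -> str:
--     normalized = []
--     previous_dash = False
--     for char in feature_id.lower():
--         if char.isalnum():
--             normalized.append(char)
--             previous_dash = False
--         elif not previous_dash:
--             normalized.append("-")
--             previous_dash = True
--     return "".join(normalized).strip("-")
-- ===== SOURCE B (Python) =====
-- def _normalize_feature_id(feature_id: str) -> str:
--     # scan for maximal alphanumeric runs, then join them with single dashes
--     s = feature_id.lower()
--     words = []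
--     i, n = 0, len(s)
--     while i < n:
--         if s[i].isalnum():
--             j = i
--             while j < n and s[j].isalnum():
--                 j += 1
--             words.append(s[i:j])
--             i = j
--         else:
--             i += 1
--     return "-".join(words)
-- ===== Notes on version B (the rewrite author's own statement) =====
-- stated objective: alternative
-- what changed: B replaces A's char-by-char loop with a previous-dash flag (then a final strip of edge dashes) by extracting the maximal alphanumeric runs of the lowered string and joining them with '-', which never produces edge dashes to strip.
import Mathlib
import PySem

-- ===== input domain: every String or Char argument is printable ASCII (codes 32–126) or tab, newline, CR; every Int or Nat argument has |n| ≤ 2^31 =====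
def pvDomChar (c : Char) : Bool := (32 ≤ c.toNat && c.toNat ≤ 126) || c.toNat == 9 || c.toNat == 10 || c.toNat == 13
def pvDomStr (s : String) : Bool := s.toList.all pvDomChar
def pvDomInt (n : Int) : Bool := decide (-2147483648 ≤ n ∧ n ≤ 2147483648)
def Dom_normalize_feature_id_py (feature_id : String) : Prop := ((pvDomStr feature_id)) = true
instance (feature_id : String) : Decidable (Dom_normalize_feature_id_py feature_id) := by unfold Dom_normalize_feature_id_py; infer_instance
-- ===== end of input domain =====

-- B joins the maximal alphanumeric runs of the lowered string with '-' instead of A's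
-- previous-dash flag loop followed by stripping edge dashes; same output, alternative structure.

-- ===== PORT A =====
def stepA (st : List Char × Bool) (char : Char) : List Char × Bool :=
  if PySem.Chars.isalnum char then (st.1 ++ [char], false)
  else if st.2 = false then (st.1 ++ ['-'], true)
  else st

def normalize_feature_id_py (feature_id : String) : String :=
  let res := (PySem.Str.lower feature_id).toList.foldl stepA ([], false)
  PySem.Str.stripChars (String.ofList res.1) "-"

-- ===== PORT B =====
-- the outer while loop of Source B: skip a non-alnum char, or cut off a maximal alnum run
def altRuns : List Char → List (List Char)
  | [] => []
  | c :: rest =>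
    if h : PySem.Chars.isalnum c then
      ((c :: rest).takeWhile PySem.Chars.isalnum) ::
        altRuns ((c :: rest).dropWhile PySem.Chars.isalnum)
    else altRuns rest
termination_by cs => cs.length
decreasing_by
  · simp only [List.dropWhile_cons, h, if_true]
    have := List.length_dropWhile_le PySem.Chars.isalnum rest
    simp; omega
  · simp

def normalize_feature_id_py_alt (feature_id : String) : String :=
  String.ofList (PySem.Chars.join ['-'] (altRuns (PySem.Str.lower feature_id).toList))

-- ===== PRECONDITION & SPEC =====
def Spec_normalize_feature_id_py (feature_id : String) (out : String) : Prop := out = normalize_feature_id_py_alt feature_id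
instance (feature_id : String) (out : String) : Decidable (Spec_normalize_feature_id_py feature_id out) := by unfold Spec_normalize_feature_id_py; infer_instance

-- ===== CLAIM (what is proved, stated in full; the proofs are below) =====
def Claim_equal_normalize_feature_id_py : Prop := ∀ (feature_id : String), Dom_normalize_feature_id_py feature_id → Spec_normalize_feature_id_py feature_id (normalize_feature_id_py feature_id)

-- ===== LEMMAS AND PROOFS =====

-- A's loop with the accumulator factored out
def normA (prev : Bool) : List Char → List Char
  | [] => []
  | c :: rest =>
    if PySem.Chars.isalnum c then c :: normA false rest
    else if prev then normA true rest else '-' :: normA true rest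

def pDash (c : Char) : Bool := ['-'].contains c

lemma foldA_eq (cs : List Char) : ∀ acc prev,
    (cs.foldl stepA (acc, prev)).1 = acc ++ normA prev cs := by
  induction cs with
  | nil => intro acc prev; simp [normA]
  | cons c rest ih =>
    intro acc prev
    by_cases h : PySem.Chars.isalnum c
    · simp [stepA, h, normA, ih]
    · cases prev <;> simp [stepA, h, normA, ih]

lemma pDash_of_alnum {c : Char} (h : PySem.Chars.isalnum c = true) : pDash c = false := by
  by_cases hc : c = '-'
  · subst hc; exact absurd h (by decide)
  · simp [pDash, hc]

lemma dropWhile_normA_true (cs : List Char) :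
    List.dropWhile pDash (normA true cs) = normA true cs := by
  induction cs with
  | nil => simp [normA]
  | cons c rest ih =>
    by_cases h : PySem.Chars.isalnum c
    · simp [normA, h, List.dropWhile_cons, pDash_of_alnum h]
    · simpa [normA, h] using ih

lemma dropWhile_normA_false (cs : List Char) :
    List.dropWhile pDash (normA false cs) = normA true cs := by
  cases cs with
  | nil => simp [normA]
  | cons c rest =>
    by_cases h : PySem.Chars.isalnum c
    · simp [normA, h, List.dropWhile_cons, pDash_of_alnum h]
    · simp [normA, h, List.dropWhile_cons, pDash, dropWhile_normA_true]

lemma runA (cs : List Char) :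
    normA false cs = cs.takeWhile PySem.Chars.isalnum
      ++ normA false (cs.dropWhile PySem.Chars.isalnum) := by
  induction cs with
  | nil => simp
  | cons c rest ih =>
    by_cases h : PySem.Chars.isalnum c
    · simp [normA, h, List.takeWhile_cons, List.dropWhile_cons, ih]
    · simp [normA, h, List.takeWhile_cons, List.dropWhile_cons]

-- trailing-dash strip
def stripTrail (l : List Char) : List Char := (List.dropWhile pDash l.reverse).reverse

lemma stripTrail_append (t u : List Char) :
    stripTrail (t ++ u) =
      if stripTrail u = [] then stripTrail t else t ++ stripTrail u := by
  unfold stripTrail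
  rw [List.reverse_append, List.dropWhile_append]
  by_cases h : List.dropWhile pDash u.reverse = []
  · simp [h]
  · simp [h, List.isEmpty_iff]

lemma stripTrail_alnum (t : List Char) (ht : ∀ c ∈ t, PySem.Chars.isalnum c = true) :
    stripTrail t = t := by
  unfold stripTrail
  have hself : List.dropWhile pDash t.reverse = t.reverse := by
    apply List.dropWhile_eq_self_iff.mpr
    intro hl
    have hmem : t.reverse[0] ∈ t := by
      rw [← List.mem_reverse]; exact List.getElem_mem hl
    intro hcon
    rw [pDash_of_alnum (ht _ hmem)] at hcon
    exact Bool.false_ne_true hcon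
  rw [hself, List.reverse_reverse]

lemma runs_ne (cs : List Char) : ∀ r ∈ altRuns cs, r ≠ [] := by
  induction cs using altRuns.induct with
  | case1 => simp [altRuns]
  | case2 c rest h ih =>
    intro r hr
    rw [altRuns, dif_pos h, List.mem_cons] at hr
    rcases hr with hr | hr
    · subst hr; simp [List.takeWhile_cons, h]
    · exact ih r hr
  | case3 c rest h ih =>
    intro r hr
    rw [altRuns, dif_neg h] at hr
    exact ih r hr

lemma intercalate_eq_nil_iff (ls : List (List Char)) (hne : ∀ r ∈ ls, r ≠ []) :
    List.intercalate ['-'] ls = [] ↔ ls = [] := by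
  constructor
  · intro hI
    cases ls with
    | nil => rfl
    | cons r rs =>
      exfalso
      cases rs with
      | nil =>
        simp [List.intercalate] at hI
        exact (hne r (by simp)) hI
      | cons r' rs' =>
        simp [List.intercalate] at hI
  · intro h; subst h; simp [List.intercalate]

lemma keyLemma (cs : List Char) :
    stripTrail (normA true cs) = List.intercalate ['-'] (altRuns cs) := by
  induction cs using altRuns.induct with
  | case1 => simp [normA, altRuns, stripTrail, List.intercalate]
  | case2 c rest h ih =>
    rw [altRuns, dif_pos h]
    have hnorm : normA true (c :: rest) =
        List.takeWhile PySem.Chars.isalnum (c :: rest)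
          ++ normA false (List.dropWhile PySem.Chars.isalnum (c :: rest)) := by
      have h1 : normA true (c :: rest) = normA false (c :: rest) := by simp [normA, h]
      rw [h1, runA]
    rw [hnorm]
    have htal : ∀ x ∈ List.takeWhile PySem.Chars.isalnum (c :: rest),
        PySem.Chars.isalnum x = true := fun _ hx => List.mem_takeWhile_imp hx
    cases hdc : List.dropWhile PySem.Chars.isalnum (c :: rest) with
    | nil =>
      rw [show normA false [] = [] from rfl, List.append_nil, stripTrail_alnum _ htal]
      simp [altRuns, List.intercalate]
    | cons c' rest' =>
      have hc' : PySem.Chars.isalnum c' = false := by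
        have := List.head_dropWhile_not PySem.Chars.isalnum
          (l := c :: rest) (by simp [hdc])
        simp only [hdc, List.head_cons] at this
        exact this
      have hskip : normA true (c' :: rest') = normA true rest' := by simp [normA, hc']
      have hruns' : altRuns (c' :: rest') = altRuns rest' := by
        rw [altRuns, dif_neg (by simp [hc'])]
      rw [hdc, hskip, hruns'] at ih
      rw [show normA false (c' :: rest') = '-' :: normA true rest' by simp [normA, hc'],
        hruns', stripTrail_append]
      have hstu : stripTrail ('-' :: normA true rest') =
          if stripTrail (normA true rest') = [] then []
          else '-' :: stripTrail (normA true rest') := by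
        rw [show ('-' :: normA true rest') = ['-'] ++ normA true rest' from rfl,
          stripTrail_append]
        split_ifs with hh
        · simp [stripTrail, pDash]
        · rfl
      by_cases hR : stripTrail (normA true rest') = []
      · have hruns0 : altRuns rest' = [] := by
          rw [← intercalate_eq_nil_iff _ (fun r hr => runs_ne rest' r hr), ← ih, hR]
        rw [hstu, if_pos hR, if_pos rfl, stripTrail_alnum _ htal, hruns0]
        simp [List.intercalate]
      · rw [hstu, if_neg hR, if_neg (by simp)]
        cases hrc : altRuns rest' with
        | nil =>
          exfalso; apply hR; rw [ih, hrc]; simp [List.intercalate]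
        | cons q qs =>
          rw [ih, hrc]
          simp [List.intercalate]
  | case3 c rest h ih =>
    rw [altRuns, dif_neg h,
      show normA true (c :: rest) = normA true rest by simp [normA, h]]
    exact ih

lemma main_eq (s : String) :
    normalize_feature_id_py s = normalize_feature_id_py_alt s := by
  unfold normalize_feature_id_py normalize_feature_id_py_alt
  simp only [PySem.Str.stripChars, PySem.Chars.join, String.toList_ofList]
  congr 1
  rw [foldA_eq, List.nil_append]
  unfold PySem.Chars.stripChars
  have hds : ("-" : String).toList = ['-'] := by decide
  rw [hds]
  show stripTrail (List.dropWhile pDash _) = _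
  rw [dropWhile_normA_false]
  exact keyLemma _

-- ===== VERDICT (by name: the statement is the Claim_ definition above) =====
theorem normalize_feature_id_py_spec : Claim_equal_normalize_feature_id_py := by
  intro s _
  unfold Spec_normalize_feature_id_py
  exact main_eq s
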